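-- pv_equiv track=rewrite | github.com/adnenabdessaied/NSVD | prog_generator/train_question_parser.py | getProgHistories
-- ===== SOURCE A (Python) =====
-- def getProgHistories(progHistToks, prgIdxToToken):
--     progHist = []
--     temp = []
--     for tok in progHistToks:
--         if tok not in [0, 1, 2]:
--             temp.append(prgIdxToToken[tok])
--             # del progHistToks[i]
--         if tok == 2:
--             # del progHistToks[i]
--             # progHist.append(" ".join(temp))
--             progHist.append(temp)
--             temp = []
--     return progHist
-- ===== SOURCE B (Python) =====
-- def getProgHistories(progHistToks, prgIdxToToken):
--     groups = []
--     toks = progHistToks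
--     while 2 in toks:
--         k = toks.index(2)
--         groups.append([prgIdxToToken[t] for t in toks[:k] if t not in (0, 1)])
--         toks = toks[k + 1:]
--     return groups
-- ===== Notes on version B (the rewrite author's own statement) =====
-- stated objective: simpler
-- what changed: A walks token by token carrying two mutable accumulators (current group and result); B instead repeatedly finds the next delimiter with index, slices off the chunk before it, and emits the filtered-and-mapped slice as one group.
import Mathlib
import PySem

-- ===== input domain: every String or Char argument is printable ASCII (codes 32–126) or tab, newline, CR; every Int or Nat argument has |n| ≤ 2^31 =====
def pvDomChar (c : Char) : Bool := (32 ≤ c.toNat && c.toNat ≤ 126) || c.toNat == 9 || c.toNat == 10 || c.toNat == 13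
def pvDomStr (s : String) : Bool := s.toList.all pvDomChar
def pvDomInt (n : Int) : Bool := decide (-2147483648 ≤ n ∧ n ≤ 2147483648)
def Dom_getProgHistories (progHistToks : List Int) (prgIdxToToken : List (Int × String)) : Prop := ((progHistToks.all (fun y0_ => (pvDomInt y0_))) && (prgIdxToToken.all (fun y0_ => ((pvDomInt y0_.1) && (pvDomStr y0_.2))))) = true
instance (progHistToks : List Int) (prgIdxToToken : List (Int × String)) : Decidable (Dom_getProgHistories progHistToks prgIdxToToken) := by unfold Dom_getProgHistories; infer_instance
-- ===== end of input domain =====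

-- B replaces A's element-by-element accumulator loop by a "find next delimiter, slice off one group, continue" decomposition (objective: simpler).

-- ===== PORT A =====
-- A's for-loop carrying the two mutable accumulators (progHist, temp).
-- prgIdxToToken[tok] is dict lookup (first match in the association list); a missing key is KeyError,
-- excluded by Pre_; inside Pre_ the `.getD ""` default is never taken.
def pvLoopA (d : List (Int × String)) : List Int → List (List String) → List String → List (List String)
  | [], progHist, _ => progHist
  | tok :: toks, progHist, temp =>
    let temp' := if ¬(tok = 0 ∨ tok = 1 ∨ tok = 2) then temp ++ [(d.lookup tok).getD ""] else temp
    if tok = 2 then pvLoopA d toks (progHist ++ [temp']) []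
    else pvLoopA d toks progHist temp'

def getProgHistories (progHistToks : List Int) (prgIdxToToken : List (Int × String)) : List (List String) :=
  pvLoopA prgIdxToToken progHistToks [] []

-- ===== PORT B =====
-- B's while-loop: while 2 is in the remaining tokens, take the chunk before the first 2
-- (toks[:k] = take k, toks.index(2) = idxOf), emit its filtered lookups as one group,
-- and continue after the delimiter (toks[k+1:] = drop (k+1)).
def pvLoopB (d : List (Int × String)) (toks : List Int) : List (List String) :=
  if h : 2 ∈ toks then
    ((toks.take (toks.idxOf 2)).filter (fun t => !(t == 0 || t == 1))).map
        (fun t => (d.lookup t).getD "")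
      :: pvLoopB d (toks.drop (toks.idxOf 2 + 1))
  else []
termination_by toks.length
decreasing_by
  have hpos : 0 < toks.length := List.length_pos_of_mem h
  simp only [List.length_drop]; omega

def getProgHistories_alt (progHistToks : List Int) (prgIdxToToken : List (Int × String)) : List (List String) :=
  pvLoopB prgIdxToToken progHistToks

-- ===== PRECONDITION & SPEC =====
-- Pre_ excludes exactly the inputs where Python A raises KeyError: a token other than 0, 1, 2
-- that is not a key of prgIdxToToken.
def Pre_getProgHistories (progHistToks : List Int) (prgIdxToToken : List (Int × String)) : Prop :=
  ∀ t ∈ progHistToks, ¬(t = 0 ∨ t = 1 ∨ t = 2) → (prgIdxToToken.lookup t).isSome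
instance (progHistToks : List Int) (prgIdxToToken : List (Int × String)) : Decidable (Pre_getProgHistories progHistToks prgIdxToToken) := by unfold Pre_getProgHistories; infer_instance

def pvWitness_getProgHistories : List Int × (List (Int × String)) :=
  ([3, 2, 0, 4, 2, 5], [(3, "count"), (4, "query"), (5, "end")])

def Spec_getProgHistories (progHistToks : List Int) (prgIdxToToken : List (Int × String)) (out : List (List String)) : Prop := out = getProgHistories_alt progHistToks prgIdxToToken
instance (progHistToks : List Int) (prgIdxToToken : List (Int × String)) (out : List (List String)) : Decidable (Spec_getProgHistories progHistToks prgIdxToToken out) := by unfold Spec_getProgHistories; infer_instance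

-- ===== CLAIM (what is proved, stated in full; the proofs are below) =====
def Claim_equal_getProgHistories : Prop := ∀ (progHistToks : List Int) (prgIdxToToken : List (Int × String)), Dom_getProgHistories progHistToks prgIdxToToken → Pre_getProgHistories progHistToks prgIdxToToken → Spec_getProgHistories progHistToks prgIdxToToken (getProgHistories progHistToks prgIdxToToken)

-- ===== LEMMAS AND PROOFS =====

-- A's loop emits the history accumulator in front of whatever it still produces.
theorem pvLoopA_hist (d : List (Int × String)) (toks : List Int) :
    ∀ (hist : List (List String)) (temp : List String),
      pvLoopA d toks hist temp = hist ++ pvLoopA d toks [] temp := by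
  induction toks with
  | nil => intro hist temp; simp [pvLoopA]
  | cons tok toks ih =>
    intro hist temp
    simp only [pvLoopA]
    by_cases h2 : tok = 2
    · subst h2
      norm_num
      rw [ih (hist ++ _), ih ([temp]), ← List.append_assoc]
    · simp only [if_neg h2]
      rw [ih hist]

-- Over a delimiter-free prefix A's loop only extends temp, by the filtered lookups.
theorem pvLoopA_no2 (d : List (Int × String)) (pre : List Int) (h : 2 ∉ pre) :
    ∀ (rest : List Int) (hist : List (List String)) (temp : List String),
      pvLoopA d (pre ++ rest) hist temp =
        pvLoopA d rest hist
          (temp ++ (pre.filter (fun t => !(t == 0 || t == 1))).map (fun t => (d.lookup t).getD "")) := by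
  induction pre with
  | nil => intro rest hist temp; simp
  | cons tok pre ih =>
    intro rest hist temp
    have htok : tok ≠ 2 := fun hc => h (hc ▸ List.mem_cons_self)
    have hpre : 2 ∉ pre := fun hc => h (List.mem_cons_of_mem _ hc)
    simp only [List.cons_append, pvLoopA, if_neg htok]
    by_cases h01 : tok = 0 ∨ tok = 1
    · have hcond : ¬¬(tok = 0 ∨ tok = 1 ∨ tok = 2) := by tauto
      rw [if_neg hcond, ih hpre]
      rcases h01 with h0 | h1
      · simp [h0]
      · simp [h1]
    · have hcond : ¬(tok = 0 ∨ tok = 1 ∨ tok = 2) := by tauto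
      rw [if_pos hcond, ih hpre]
      have h0 : ¬tok = 0 := fun hc => h01 (Or.inl hc)
      have h1 : ¬tok = 1 := fun hc => h01 (Or.inr hc)
      simp [h0, h1]

-- Without a delimiter A emits nothing more: the pending temp is discarded.
theorem pvLoopA_nodelim (d : List (Int × String)) (toks : List Int) (h : 2 ∉ toks) :
    ∀ (hist : List (List String)) (temp : List String), pvLoopA d toks hist temp = hist := by
  induction toks with
  | nil => intro hist temp; simp [pvLoopA]
  | cons tok toks ih =>
    intro hist temp
    have htok : tok ≠ 2 := fun hc => h (hc ▸ List.mem_cons_self)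
    simp only [pvLoopA, if_neg htok]
    exact ih (fun hc => h (List.mem_cons_of_mem _ hc)) hist _

-- Decomposing a list at the first occurrence of 2.
theorem split_at_first_two (toks : List Int) (h : 2 ∈ toks) :
    toks = toks.take (toks.idxOf 2) ++ 2 :: toks.drop (toks.idxOf 2 + 1) ∧
      2 ∉ toks.take (toks.idxOf 2) := by
  induction toks with
  | nil => cases h
  | cons tok toks ih =>
    by_cases h2 : tok = 2
    · subst h2
      simp
    · have hmem : 2 ∈ toks := by
        rcases List.mem_cons.mp h with hc | hc
        · exact absurd hc.symm h2
        · exact hc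
      have hidx : (tok :: toks).idxOf 2 = toks.idxOf 2 + 1 := by
        simp [h2]
      obtain ⟨heq, hnot⟩ := ih hmem
      constructor
      · rw [hidx]
        simpa using congrArg (tok :: ·) heq
      · rw [hidx]
        intro hc
        rcases List.mem_cons.mp (by simpa using hc) with hc' | hc'
        · exact h2 hc'.symm
        · exact hnot hc'

-- Main equivalence of the two loops, by strong induction on the length.
theorem pvLoop_eq (d : List (Int × String)) :
    ∀ (n : Nat) (toks : List Int), toks.length ≤ n → pvLoopA d toks [] [] = pvLoopB d toks := by
  intro n
  induction n with
  | zero =>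
    intro toks hlen
    have : toks = [] := List.eq_nil_of_length_eq_zero (Nat.le_zero.mp hlen)
    subst this
    rw [pvLoopB]
    simp [pvLoopA]
  | succ n ih =>
    intro toks hlen
    by_cases h : 2 ∈ toks
    · obtain ⟨heq, hnot⟩ := split_at_first_two toks h
      have hlpos : 0 < toks.length := List.length_pos_of_mem h
      have hrest : (toks.drop (toks.idxOf 2 + 1)).length ≤ n := by
        simp only [List.length_drop]; omega
      calc pvLoopA d toks [] []
          = pvLoopA d (toks.take (toks.idxOf 2) ++ 2 :: toks.drop (toks.idxOf 2 + 1)) [] [] := by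
            rw [← heq]
        _ = pvLoopA d (2 :: toks.drop (toks.idxOf 2 + 1)) []
              (((toks.take (toks.idxOf 2)).filter (fun t => !(t == 0 || t == 1))).map
                (fun t => (d.lookup t).getD "")) := by
            rw [pvLoopA_no2 d _ hnot]; simp
        _ = pvLoopB d toks := by
            simp only [pvLoopA]
            norm_num
            rw [pvLoopA_hist, ih _ hrest]
            conv_rhs => rw [pvLoopB]
            rw [dif_pos h]
            simp
    · rw [pvLoopB, dif_neg h]
      exact pvLoopA_nodelim d toks h [] []

-- ===== VERDICT (by name: the statement is the Claim_ definition above) =====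
theorem getProgHistories_spec : Claim_equal_getProgHistories := by
  intro progHistToks prgIdxToToken _ _
  unfold Spec_getProgHistories getProgHistories getProgHistories_alt
  exact pvLoop_eq prgIdxToToken progHistToks.length progHistToks le_rfl
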